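-- pv_equiv track=rewrite | github.com/joaoperigo/knn_python | knn.py | rotulo_de_maior_frequencia_sem_empate
-- ===== SOURCE A (Python) =====
-- from collections import Counter
--
-- def rotulo_de_maior_frequencia_sem_empate(pessoas):
--     frequencias = Counter(pessoas)
--     rotulo, frequencia = frequencias.most_common(1)[0]
--     qtde_de_mais_frequentes = len(
--         [count for count in frequencias.values() if count == frequencia])
--     if qtde_de_mais_frequentes == 1:
--         return rotulo
--     return rotulo_de_maior_frequencia_sem_empate(pessoas[:-1])
-- ===== SOURCE B (Python) =====
-- def rotulo_de_maior_frequencia_sem_empate(pessoas):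
--     # One counting pass, then trim the tail by decrementing counts in place
--     # instead of rebuilding a Counter of each prefix (a different algorithm,
--     # same result).
--     cnt = {}
--     for x in pessoas:
--         cnt[x] = cnt.get(x, 0) + 1
--     k = len(pessoas)
--     while True:
--         vals = list(cnt.values())
--         m = max(vals)
--         if vals.count(m) == 1:
--             for x in pessoas[:k]:
--                 if cnt[x] == m:
--                     return x
--         last = pessoas[k - 1]
--         cnt[last] = cnt[last] - 1
--         k -= 1
-- ===== Notes on version B (the rewrite author's own statement) =====
-- stated objective: alternative
-- what changed: Counts are built once and the tail is trimmed by decrementing the last element's count in place (checking max-uniqueness over the count values and scanning the prefix for the first label with the max count), instead of recursively rebuilding a Counter of every prefix and slicing the list each level.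
import Mathlib
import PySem

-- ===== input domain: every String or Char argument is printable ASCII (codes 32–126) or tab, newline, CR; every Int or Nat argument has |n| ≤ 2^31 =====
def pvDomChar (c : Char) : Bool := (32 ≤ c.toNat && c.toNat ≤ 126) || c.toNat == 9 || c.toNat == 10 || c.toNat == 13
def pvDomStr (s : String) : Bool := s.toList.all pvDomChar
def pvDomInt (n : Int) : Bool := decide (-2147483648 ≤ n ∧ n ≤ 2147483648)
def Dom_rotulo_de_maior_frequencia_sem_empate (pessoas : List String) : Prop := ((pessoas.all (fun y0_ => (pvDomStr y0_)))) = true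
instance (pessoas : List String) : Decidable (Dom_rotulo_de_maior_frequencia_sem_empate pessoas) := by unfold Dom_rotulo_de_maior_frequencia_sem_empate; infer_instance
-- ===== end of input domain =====

-- B builds the counts once and trims the tail by decrementing counts in place instead of
-- rebuilding a Counter of every prefix; equivalence is proved for the return value on
-- nonempty input (A raises IndexError on []).

-- ===== PORT A =====
def rotulo_de_maior_frequencia_sem_empate (pessoas : List String) : String :=
  if h : pessoas = [] then ""   -- Python: most_common(1)[0] raises IndexError here; excluded by Pre_
  else
    let frequencias := PySem.Dict.counter pessoas
    -- frequencias.most_common(1)[0] = first item (insertion order) with maximal count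
    match PySem.List.max? frequencias.items (fun p => p.2) with
    | none => ""   -- unreachable: pessoas ≠ []
    | some (rotulo, frequencia) =>
      let qtde_de_mais_frequentes :=
        (frequencias.values.filter (fun count => count == frequencia)).length
      if qtde_de_mais_frequentes = 1 then rotulo
      else rotulo_de_maior_frequencia_sem_empate pessoas.dropLast
termination_by pessoas.length
decreasing_by
  simpa [List.length_dropLast] using Nat.sub_lt (List.length_pos_of_ne_nil h) one_pos

-- ===== PORT B =====
-- the 'while True' loop of Source B; the fuel k is the current prefix length, which Source B decrements
def pvAltLoop (pessoas : List String) (cnt : PySem.Dict String Int) : Nat → String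
  | 0 => ""   -- not reached: the loop always returns at k = 1
  | k + 1 =>
    let vals := cnt.values
    let m := (PySem.List.max? vals (fun v => v)).getD 0
    if vals.count m = 1 then
      ((pessoas.take (k + 1)).find? (fun x => cnt.getD x 0 == m)).getD ""
    else
      let last := pessoas.getD k ""
      pvAltLoop pessoas (cnt.insert last (cnt.getD last 0 - 1)) k

def rotulo_de_maior_frequencia_sem_empate_alt (pessoas : List String) : String :=
  let cnt := pessoas.foldl (fun d x => d.insert x (d.getD x 0 + 1)) PySem.Dict.empty
  pvAltLoop pessoas cnt pessoas.length

-- ===== PRECONDITION & SPEC =====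
-- Pre_ excludes only the empty list, on which A raises IndexError (and B raises ValueError).
def Pre_rotulo_de_maior_frequencia_sem_empate (pessoas : List String) : Prop := pessoas ≠ []
instance (pessoas : List String) : Decidable (Pre_rotulo_de_maior_frequencia_sem_empate pessoas) := by unfold Pre_rotulo_de_maior_frequencia_sem_empate; infer_instance
def pvWitness_rotulo_de_maior_frequencia_sem_empate : List String := ["ana", "bia", "ana"]
def Spec_rotulo_de_maior_frequencia_sem_empate (pessoas : List String) (out : String) : Prop := out = rotulo_de_maior_frequencia_sem_empate_alt pessoas
instance (pessoas : List String) (out : String) : Decidable (Spec_rotulo_de_maior_frequencia_sem_empate pessoas out) := by unfold Spec_rotulo_de_maior_frequencia_sem_empate; infer_instance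

-- ===== CLAIM (what is proved, stated in full; the proofs are below) =====
def Claim_equal_rotulo_de_maior_frequencia_sem_empate : Prop := ∀ (pessoas : List String), Dom_rotulo_de_maior_frequencia_sem_empate pessoas → Pre_rotulo_de_maior_frequencia_sem_empate pessoas → Spec_rotulo_de_maior_frequencia_sem_empate pessoas (rotulo_de_maior_frequencia_sem_empate pessoas)

-- ===== LEMMAS AND PROOFS =====

def pvStep {α : Type} (c : α → Int) : Option α → α → Option α :=
  fun acc x => match acc with
    | none => some x
    | some m => if c m < c x then some x else some m

lemma pv_max?_eq_foldl {α : Type} (c : α → Int) (S : List α) :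
    PySem.List.max? S c = S.foldl (pvStep c) none := rfl

lemma pv_max?_map_aux {α β : Type} (f : α → β) (key : β → Int) (S : List α) :
    ∀ acc : Option α,
      S.foldl (fun a x => pvStep key a (f x)) (acc.map f)
        = (S.foldl (pvStep (fun x => key (f x))) acc).map f := by
  induction S with
  | nil => intro acc; rfl
  | cons z S ih =>
    intro acc
    cases acc with
    | none => simpa [pvStep] using ih (some z)
    | some m =>
      by_cases h : key (f m) < key (f z) <;>
        simpa [pvStep, h] using by first
          | exact ih (some z)
          | exact ih (some m)

lemma pv_max?_map {α β : Type} (f : α → β) (key : β → Int) (S : List α) :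
    PySem.List.max? (S.map f) key = (PySem.List.max? S (fun x => key (f x))).map f := by
  rw [pv_max?_eq_foldl, pv_max?_eq_foldl, List.foldl_map]
  simpa using pv_max?_map_aux f key S none

lemma pv_max?_fold_some {α : Type} (c : α → Int) (S : List α) :
    ∀ a : α, S.foldl (pvStep c) (some a)
      = match S.foldl (pvStep c) none with
        | none => some a
        | some m => if c m ≤ c a then some a else some m := by
  induction S with
  | nil => intro a; rfl
  | cons z S ih =>
    intro a
    rw [List.foldl_cons, List.foldl_cons, show pvStep c none z = some z from rfl, ih z]
    by_cases h : c a < c z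
    · rw [show pvStep c (some a) z = some z by simp [pvStep, h], ih z]
      cases M : S.foldl (pvStep c) none with
      | none => simp [show ¬ (c z ≤ c a) from by omega]
      | some m =>
        by_cases hmz : c m ≤ c z
        · simp [hmz, show ¬ (c z ≤ c a) from by omega]
        · simp [hmz, show ¬ (c m ≤ c a) from by omega]
    · rw [show pvStep c (some a) z = some a by simp [pvStep, h], ih a]
      cases M : S.foldl (pvStep c) none with
      | none => simp [show c z ≤ c a from by omega]
      | some m =>
        by_cases hmz : c m ≤ c z
        · by_cases hma : c m ≤ c a
          · simp [hmz, hma, show c z ≤ c a from by omega]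
          · exact absurd (le_trans hmz (by omega)) hma
        · simp [hmz]

lemma pv_max?_cons {α : Type} (c : α → Int) (x : α) (S : List α) :
    PySem.List.max? (x :: S) c =
      match PySem.List.max? S c with
      | none => some x
      | some m => if c m ≤ c x then some x else some m := by
  rw [pv_max?_eq_foldl, pv_max?_eq_foldl, List.foldl_cons,
    show pvStep c none x = some x from rfl]
  exact pv_max?_fold_some c S x

lemma pv_max?_find {α : Type} [BEq α] [LawfulBEq α] (c : α → Int) {S : List α} {y : α}
    (h : PySem.List.max? S c = some y) :
    S.find? (fun x => c x == c y) = some y := by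
  induction S generalizing y with
  | nil => simp [PySem.List.max?] at h
  | cons z S ih =>
    rw [pv_max?_cons] at h
    cases M : PySem.List.max? S c with
    | none =>
      rw [M] at h
      simp only [] at h
      cases h
      simp
    | some m =>
      rw [M] at h
      simp only [] at h
      by_cases hmz : c m ≤ c z
      · rw [if_pos hmz] at h
        cases h
        simp
      · rw [if_neg hmz] at h
        cases h
        have hlt : ¬ (c z = c y) := by omega
        rw [List.find?_cons_of_neg (by simpa using hlt)]
        exact ih M

lemma pv_max?_append_le {α : Type} (c : α → Int) {S ext : List α} {y : α}
    (h : PySem.List.max? S c = some y) (hext : ∀ x ∈ ext, c x ≤ c y) :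
    PySem.List.max? (S ++ ext) c = some y := by
  rw [pv_max?_eq_foldl, List.foldl_append, ← pv_max?_eq_foldl, h]
  induction ext with
  | nil => rfl
  | cons z ext ih =>
    rw [List.foldl_cons, show pvStep c (some y) z = some y by
      simp [pvStep, show ¬ (c y < c z) from by have := hext z (by simp); omega]]
    exact ih (fun x hx => hext x (by simp [hx]))

lemma pv_find?_foldl_add (p : String → Bool) (r : List String) :
    ∀ s : List String, (r.foldl PySem.Set.add s).find? p = (s.find? p).or (r.find? p) := by
  induction r with
  | nil => intro s; simp
  | cons z r ih =>
    intro s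
    rw [List.foldl_cons, ih]
    have hadd : (PySem.Set.add s z).find? p = (s.find? p).or (if p z then some z else none) := by
      by_cases hz : s.contains z
      · have hzm : z ∈ s := List.mem_of_elem_eq_true hz
        rw [show PySem.Set.add s z = s by simp [PySem.Set.add, PySem.Set.contains, hzm]]
        cases hf : s.find? p with
        | some w => simp
        | none =>
          have : ¬ p z := by simpa using List.find?_eq_none.mp hf z hzm
          simp [this]
      · have hzm : z ∉ s := fun h => hz (List.elem_eq_true_of_mem h)
        rw [show PySem.Set.add s z = s ++ [z] by
          simp [PySem.Set.add, PySem.Set.contains, hzm]]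
        rw [List.find?_append]
        cases hp : p z <;> simp [List.find?, hp]
    rw [hadd, List.find?_cons]
    by_cases hp : p z <;> simp [hp]

lemma pv_foldl_add_decomp (r : List String) :
    ∀ s : List String, ∃ ext, r.foldl PySem.Set.add s = s ++ ext ∧ ∀ x ∈ ext, x ∉ s := by
  induction r with
  | nil => intro s; exact ⟨[], by simp⟩
  | cons z r ih =>
    intro s
    by_cases hz : s.contains z
    · have hzm : z ∈ s := List.mem_of_elem_eq_true hz
      obtain ⟨ext, he, hn⟩ := ih s
      exact ⟨ext, by rw [List.foldl_cons, show PySem.Set.add s z = s by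
        simp [PySem.Set.add, PySem.Set.contains, hzm]]; exact he, hn⟩
    · have hzm : z ∉ s := fun h => hz (List.elem_eq_true_of_mem h)
      obtain ⟨ext, he, hn⟩ := ih (s ++ [z])
      refine ⟨z :: ext, ?_, ?_⟩
      · rw [List.foldl_cons, show PySem.Set.add s z = s ++ [z] by
          simp [PySem.Set.add, PySem.Set.contains, hzm], he]
        simp
      · intro x hx
        rcases List.mem_cons.mp hx with rfl | hx
        · exact hzm
        · intro hxs; exact hn x hx (by simp [hxs])

-- the main loop invariant: with cnt holding the counts of l.take k (on key set Set.ofList l),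
-- pvAltLoop computes exactly A on the prefix l.take k
lemma pv_loop_eq (l : List String) :
    ∀ (k : Nat) (cnt : PySem.Dict String Int), 1 ≤ k → k ≤ l.length →
      cnt.keys = PySem.Set.ofList l →
      (∀ x, cnt.getD x 0 = ((l.take k).count x : Int)) →
      pvAltLoop l cnt k = rotulo_de_maior_frequencia_sem_empate (l.take k) := by
  intro k
  induction k with
  | zero => intro cnt h1; exact absurd h1 (by omega)
  | succ k' ih =>
    intro cnt _ hkl hkeys hget
    have hk' : k' < l.length := hkl
    have htne : l.take (k' + 1) ≠ [] := by
      have : (l.take (k' + 1)).length = k' + 1 := by simp [List.length_take]; omega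
      intro h; rw [h] at this; simp at this
    -- abbreviations
    set t := l.take (k' + 1) with ht
    set c : String → Int := (fun x => ((t.count x : Nat) : Int)) with hc
    set St := PySem.Set.ofList t with hSt
    -- the first max of the counter of t
    have hSne : St ≠ [] := by
      intro h
      have := (PySem.Set.mem_ofList t (t.head htne)).mpr (List.head_mem htne)
      rw [← hSt, h] at this; simp at this
    obtain ⟨y, hy⟩ : ∃ y, PySem.List.max? St c = some y := by
      cases hM : PySem.List.max? St c with
      | none => exact absurd ((PySem.List.max?_eq_none_iff St c).mp hM) hSne
      | some y => exact ⟨y, rfl⟩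
    have hymem : y ∈ t := (PySem.Set.mem_ofList t y).mp (by rw [← hSt]; exact PySem.List.max?_mem hy)
    have hcy1 : 1 ≤ c y := by
      have := List.count_pos_iff.mpr hymem
      simp only [hc]; omega
    -- A side: counter items and values
    have hitems : (PySem.Dict.counter t).items = St.map (fun x => (x, c x)) :=
      PySem.Dict.items_counter t
    have hmaxitems : PySem.List.max? (PySem.Dict.counter t).items (fun p => p.2)
        = some (y, c y) := by
      rw [hitems, pv_max?_map (fun x => (x, c x)) (fun p => p.2) St]
      rw [show (fun x => (x, c x).2) = c from rfl, hy]
      rfl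
    have hvalues : (PySem.Dict.counter t).values = St.map c := by
      show ((PySem.Dict.counter t).items.map Prod.snd) = St.map c
      rw [hitems, List.map_map]
      rfl
    -- B side: cnt.values is St.map c padded with zero counts of later labels
    have hnodup : cnt.keys.Nodup := by rw [hkeys]; exact PySem.Set.nodup_ofList l
    obtain ⟨ext, hdec, hnotin⟩ :
        ∃ ext, PySem.Set.ofList l = St ++ ext ∧ ∀ x ∈ ext, x ∉ St := by
      have hsplit : PySem.Set.ofList l = (l.drop (k' + 1)).foldl PySem.Set.add St := by
        conv_lhs => rw [show l = t ++ l.drop (k' + 1) by rw [ht]; exact (List.take_append_drop _ l).symm]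
        rw [hSt, PySem.Set.ofList, PySem.Set.ofList, List.foldl_append]
      obtain ⟨ext, he, hn⟩ := pv_foldl_add_decomp (l.drop (k' + 1)) St
      exact ⟨ext, by rw [hsplit, he], hn⟩
    have hext0 : ∀ x ∈ ext, c x = 0 := by
      intro x hx
      have hxt : x ∉ t := fun hmem => hnotin x hx (by rw [hSt]; exact (PySem.Set.mem_ofList t x).mpr hmem)
      simp only [hc]
      rw [List.count_eq_zero.mpr hxt]
      rfl
    have hvals : cnt.values = (St ++ ext).map c := by
      rw [PySem.Dict.values_eq_map_keys cnt hnodup 0, hkeys, hdec]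
      exact List.map_congr_left (fun x _ => hget x)
    have hmaxvals : PySem.List.max? cnt.values (fun v => v) = some (c y) := by
      have h1 : PySem.List.max? (St ++ ext) c = some y :=
        pv_max?_append_le c hy (fun x hx => by rw [hext0 x hx]; omega)
      rw [hvals, pv_max?_map c (fun v => v) (St ++ ext), h1]
      rfl
    have hcnt : cnt.values.count (c y) = (St.map c).count (c y) := by
      have hz : (ext.map c).count (c y) = 0 :=
        List.count_eq_zero.mpr (fun hmem => by
          obtain ⟨x, hx, hcx⟩ := List.mem_map.mp hmem
          rw [hext0 x hx] at hcx
          omega)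
      rw [hvals, List.map_append, List.count_append, hz]
      omega
    -- unfold one step of each side
    rw [pvAltLoop, rotulo_de_maior_frequencia_sem_empate.eq_def, dif_neg htne]
    simp only [hmaxitems, hmaxvals, Option.getD_some, hcnt, hvalues,
      ← List.count_eq_length_filter]
    by_cases hq : List.count (c y) (List.map c St) = 1
    · rw [if_pos hq, if_pos hq]
      have hpred : (fun x => cnt.getD x 0 == c y) = (fun x => c x == c y) :=
        funext fun x => by rw [hget x]
      have hfind : (l.take (k' + 1)).find? (fun x => c x == c y) = some y := by
        have h5 := pv_find?_foldl_add (fun x => c x == c y) t []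
        rw [show t.foldl PySem.Set.add [] = St from rfl] at h5
        simp only [List.find?_nil, Option.none_or] at h5
        rw [pv_max?_find c hy] at h5
        rw [← ht]
        exact h5.symm
      rw [hpred, hfind]
      rfl
    · rw [if_neg hq, if_neg hq]
      -- the else branch is only reachable for prefixes of length ≥ 2
      have hk1 : 1 ≤ k' := by
        by_contra hk0
        have hk0' : k' = 0 := by omega
        subst hk0'
        have ht1 : t = [l[0]] := by
          rw [ht, List.take_add_one, List.take_zero, List.nil_append,
            List.getElem?_eq_getElem hk']
          rfl
        have hy1 : y = l[0] := by
          have := hymem; rw [ht1] at this; simpa using this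
        apply hq
        rw [show St = [l[0]] by rw [hSt, ht1]; rfl, hy1]
        simp
      have hlast : l.getD k' "" = l[k'] := List.getD_eq_getElem l "" hk'
      have htsplit : t = l.take k' ++ [l[k']] := by
        rw [ht, List.take_add_one, List.getElem?_eq_getElem hk']
        rfl
      have htd : t.dropLast = l.take k' := by rw [htsplit, List.dropLast_concat]
      rw [htd, hlast]
      apply ih _ hk1 (le_of_lt hk')
      · rw [PySem.Dict.keys_insert_of_contains]
        · exact hkeys
        · rw [PySem.Dict.contains_iff_mem_keys, hkeys]
          exact (PySem.Set.mem_ofList l _).mpr (List.getElem_mem hk')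
      · intro x
        rw [PySem.Dict.getD_insert]
        by_cases hx : x = l[k']
        · rw [if_pos hx, hget, hx]
          have : List.count l[k'] t = List.count l[k'] (l.take k') + 1 := by
            rw [htsplit, List.count_append]
            simp
          rw [this]
          push_cast
          ring
        · rw [if_neg hx, hget]
          have : List.count x t = List.count x (l.take k') := by
            have h0 : List.count x [l[k']] = 0 :=
              List.count_eq_zero.mpr (by simpa using hx)
            rw [htsplit, List.count_append, h0]
            omega
          rw [this]

-- ===== VERDICT (by name: the statement is the Claim_ definition above) =====
theorem rotulo_de_maior_frequencia_sem_empate_spec : Claim_equal_rotulo_de_maior_frequencia_sem_empate := by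
  intro pessoas _ hne
  unfold Spec_rotulo_de_maior_frequencia_sem_empate
  unfold rotulo_de_maior_frequencia_sem_empate_alt
  rw [PySem.Dict.foldl_insert_getD_add_one_eq_counter]
  have h := pv_loop_eq pessoas pessoas.length (PySem.Dict.counter pessoas)
    (Nat.one_le_iff_ne_zero.mpr (by simpa using hne)) le_rfl
    (PySem.Dict.keys_counter pessoas)
    (by intro x; simp [PySem.Dict.getD_counter])
  simp only [List.take_length] at h
  exact h.symm
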